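-- pv_equiv track=rewrite | github.com/Jeon-Jae-woo/CodingTest | 음악플레이.py | solution
-- ===== SOURCE A (Python) =====
-- def solution(play_list, listen_time):
--     answer = 0
--     temp_play_list = []
--
--     for i in range(0, len(play_list)):
--         temp = listen_time -1
--         j = i+1
--         count = 1
--         while True:
--             if temp <= 0:
--                 temp_play_list.append(count)
--                 break
--             if j >= len(play_list):
--                 j = 0
--             temp = temp - play_list[j]
--             count +=1
--
--             j +=1
--
--     answer = max(temp_play_list)
--     if answer >= len(play_list):
--         answer = len(play_list)
--
--     return answer
-- ===== SOURCE B (Python) =====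
-- def _bisect(pref, target, lo, hi):
--     # least m in [lo, hi] with pref[m] >= target (pref nondecreasing on the range)
--     if lo >= hi:
--         return lo
--     mid = (lo + hi) // 2
--     if pref[mid] >= target:
--         return _bisect(pref, target, lo, mid)
--     return _bisect(pref, target, mid + 1, hi)
--
--
-- def solution(play_list, listen_time):
--     n = len(play_list)
--     if listen_time <= 1:
--         return min(n, 1)
--     total = sum(play_list)
--     L = listen_time - 1
--     if L > total:
--         return n  # even a full cycle is not enough from any start: capped at n
--     pref = [0]
--     for x in play_list + play_list:
--         pref.append(pref[-1] + x)
--     best = 0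
--     for i in range(n):
--         m = _bisect(pref, pref[i + 1] + L, i + 1, i + 1 + n)
--         best = max(best, m - i)
--     return min(best, n)
-- ===== Notes on version B (the rewrite author's own statement) =====
-- stated objective: alternative
-- what changed: A simulates listening from every start with an inner while-loop subtracting songs one by one; B precomputes prefix sums of the doubled playlist, answers each start with a recursive binary search for the first prefix reaching the target (O(n log n) on positive playlists vs A's O(n * answer)), and short-circuits the listen_time<=1 and listen_time-1>sum(play_list) cases.
-- outside the precondition, e.g. on solution([4, 3, -3, 5], 3): A returns 3, B returns 4; on solution([0, 0], 2): A does not finish within the time limit, B returns 2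
import Mathlib
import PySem

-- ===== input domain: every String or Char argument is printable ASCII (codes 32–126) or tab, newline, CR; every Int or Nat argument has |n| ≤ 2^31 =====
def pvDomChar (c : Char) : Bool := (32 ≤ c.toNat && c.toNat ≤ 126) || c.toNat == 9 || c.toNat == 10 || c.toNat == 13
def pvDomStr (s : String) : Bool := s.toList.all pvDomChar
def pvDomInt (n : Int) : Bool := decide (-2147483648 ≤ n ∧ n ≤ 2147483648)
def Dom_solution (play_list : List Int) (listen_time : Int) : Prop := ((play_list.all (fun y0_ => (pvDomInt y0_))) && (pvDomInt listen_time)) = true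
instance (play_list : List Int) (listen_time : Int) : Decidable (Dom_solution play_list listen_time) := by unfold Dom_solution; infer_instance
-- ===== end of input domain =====

-- B replaces A's per-start song-by-song countdown simulation by prefix sums of the
-- doubled playlist plus a binary search per start (objective: alternative algorithm).


-- ===== PORT A =====
-- A's `while True` loop; the fuel argument only makes the recursion total — under
-- Pre_ (all song lengths ≥ 1) the loop stops after at most listen_time-1 subtractions,
-- and the port is called with fuel = listen_time.toNat + 1, so fuel never runs out there.
def aLoop (pl : List Int) : Nat → Int → Int → Int → Int
  | 0, _, _, count => count
  | fuel + 1, temp, j, count =>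
    if temp ≤ 0 then count
    else
      let j2 := if j ≥ (pl.length : Int) then 0 else j
      -- pl[j2] : j2 is always in range when pl ≠ [] (the only case the loop runs), so getD's default is never used
      aLoop pl fuel (temp - PySem.List.pyGetD pl j2 0) (j2 + 1) (count + 1)

def solution (play_list : List Int) (listen_time : Int) : Int :=
  let tpl := (List.range play_list.length).foldl
    (fun acc (i : Nat) => acc ++ [aLoop play_list (listen_time.toNat + 1) (listen_time - 1) ((i : Int) + 1) 1]) []
  -- max(temp_play_list): raises on [] (excluded by Pre_), hence the Option default
  let answer := (PySem.List.max? tpl (fun y => y)).getD 0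
  if answer ≥ (play_list.length : Int) then (play_list.length : Int) else answer

-- ===== PORT B =====
-- least m in [lo, hi] with pref[m] >= target (pref nondecreasing there)
def bisect (pref : List Int) (target lo hi : Int) : Int :=
  if lo ≥ hi then lo
  else
    let mid := PySem.Int.floordiv (lo + hi) 2
    if PySem.List.pyGetD pref mid 0 ≥ target then bisect pref target lo mid
    else bisect pref target (mid + 1) hi
  termination_by (hi - lo).toNat
  decreasing_by
  · have h2 := PySem.Int.floordiv_eq_ediv_of_pos (a := lo + hi) (b := 2) (by omega)
    simp only [h2]; omega
  · have h2 := PySem.Int.floordiv_eq_ediv_of_pos (a := lo + hi) (b := 2) (by omega)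
    simp only [h2]; omega

def solution_alt (play_list : List Int) (listen_time : Int) : Int :=
  let n : Int := (play_list.length : Int)
  if listen_time ≤ 1 then min n 1
  else
    let total := play_list.sum
    let L := listen_time - 1
    if L > total then n
    else
      -- pref[-1] : pref is never empty, so getD's default is never used
      let pref := (play_list ++ play_list).foldl
        (fun acc x => acc ++ [PySem.List.pyGetD acc (-1) 0 + x]) [0]
      let best := (List.range play_list.length).foldl
        (fun best (i : Nat) =>
          let m := bisect pref (PySem.List.pyGetD pref ((i : Int) + 1) 0 + L) ((i : Int) + 1) ((i : Int) + 1 + n)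
          max best (m - (i : Int))) 0
      min best n

-- ===== PRECONDITION & SPEC =====
-- Pre_ excludes the empty playlist (A's max([]) raises ValueError) and playlists that
-- contain a non-positive song length when listen_time ≥ 2: there A's unit-step countdown
-- may loop forever, and where it does return, the value is an artefact of how the
-- countdown happens to dip below zero, which B's monotone prefix-sum search does not track.
def Pre_solution (play_list : List Int) (listen_time : Int) : Prop :=
  play_list ≠ [] ∧ (listen_time ≤ 1 ∨ ∀ x ∈ play_list, 1 ≤ x)
instance (play_list : List Int) (listen_time : Int) : Decidable (Pre_solution play_list listen_time) := by
  unfold Pre_solution; infer_instance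
def pvWitness_solution : List Int × Int := ([3, 2, 4], 7)

def Spec_solution (play_list : List Int) (listen_time : Int) (out : Int) : Prop := out = solution_alt play_list listen_time
instance (play_list : List Int) (listen_time : Int) (out : Int) : Decidable (Spec_solution play_list listen_time out) := by unfold Spec_solution; infer_instance

-- ===== CLAIM (what is proved, stated in full; the proofs are below) =====
def Claim_equal_solution : Prop := ∀ (play_list : List Int) (listen_time : Int), Dom_solution play_list listen_time → Pre_solution play_list listen_time → Spec_solution play_list listen_time (solution play_list listen_time)

-- ===== LEMMAS AND PROOFS =====

-- the song length heard at wrapped position j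
def cyc (pl : List Int) (j : Nat) : Int := pl.getD (j % pl.length) 0
-- total length of the k songs starting at wrapped position j
def csum (pl : List Int) (j k : Nat) : Int := ((List.range k).map (fun t => cyc pl (j + t))).sum

lemma csum_zero (pl : List Int) (j : Nat) : csum pl j 0 = 0 := by simp [csum]

lemma csum_succ_right (pl : List Int) (j k : Nat) :
    csum pl j (k + 1) = csum pl j k + cyc pl (j + k) := by
  simp [csum, List.range_succ]

lemma csum_succ_left (pl : List Int) (j k : Nat) :
    csum pl j (k + 1) = cyc pl j + csum pl (j + 1) k := by
  induction k generalizing j with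
  | zero => simp [csum_succ_right, csum_zero]
  | succ k ih =>
      rw [csum_succ_right, ih, csum_succ_right]
      have : j + 1 + k = j + (k + 1) := by omega
      rw [this]; ring

lemma cyc_mem (pl : List Int) (hne : pl ≠ []) (j : Nat) : cyc pl j ∈ pl := by
  have h : j % pl.length < pl.length := Nat.mod_lt _ (List.length_pos_iff.mpr hne)
  rw [cyc, List.getD_eq_getElem _ _ h]
  exact List.getElem_mem _

lemma cyc_mod_add (pl : List Int) (j m : Nat) : cyc pl (j % pl.length + m) = cyc pl (j + m) := by
  simp [cyc, Nat.mod_add_mod]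

lemma csum_mod_add (pl : List Int) (j m k : Nat) :
    csum pl (j % pl.length + m) k = csum pl (j + m) k := by
  simp only [csum]
  congr 1
  apply List.map_congr_left
  intro t _
  have h1 : j % pl.length + m + t = j % pl.length + (m + t) := by omega
  have h2 : j + m + t = j + (m + t) := by omega
  rw [h1, h2, cyc_mod_add]

lemma le_csum (pl : List Int) (hne : pl ≠ []) (hpos : ∀ x ∈ pl, 1 ≤ x) (j k : Nat) :
    (k : Int) ≤ csum pl j k := by
  induction k with
  | zero => simp [csum_zero]
  | succ k ih =>
      have h1 := hpos _ (cyc_mem pl hne (j + k))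
      rw [csum_succ_right]
      push_cast
      omega

lemma csum_add (pl : List Int) (j a b : Nat) :
    csum pl j (a + b) = csum pl j a + csum pl (j + a) b := by
  induction b with
  | zero => simp [csum_zero]
  | succ b ih =>
      have h1 : j + (a + b) = j + a + b := by omega
      rw [show a + (b + 1) = (a + b) + 1 from rfl, csum_succ_right, ih, csum_succ_right, h1]
      ring

lemma csum_cycle (pl : List Int) (j : Nat) : csum pl j pl.length = pl.sum := by
  induction j with
  | zero =>
      have hmap : (List.range pl.length).map (fun t => cyc pl (0 + t)) = pl := by
        apply List.ext_getElem
        · simp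
        · intro i h1 h2
          simp only [List.getElem_map, List.getElem_range]
          have hi : i < pl.length := by simpa using h2
          simp [cyc, Nat.mod_eq_of_lt hi, List.getD_eq_getElem?_getD, List.getElem?_eq_getElem hi]
      rw [csum, hmap]
  | succ j ih =>
      have h1 : csum pl j (pl.length + 1) = csum pl j pl.length + cyc pl (j + pl.length) :=
        csum_succ_right ..
      have h2 : csum pl j (pl.length + 1) = cyc pl j + csum pl (j + 1) pl.length :=
        csum_succ_left ..
      have h3 : cyc pl (j + pl.length) = cyc pl j := by
        simp [cyc, Nat.add_mod_right]
      rw [h3] at h1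
      omega

lemma csum_le_total (pl : List Int) (hne : pl ≠ []) (hpos : ∀ x ∈ pl, 1 ≤ x) (j k : Nat)
    (hk : k ≤ pl.length) : csum pl j k ≤ pl.sum := by
  have h1 : csum pl j pl.length = csum pl j k + csum pl (j + k) (pl.length - k) := by
    rw [← csum_add]
    congr 1
    omega
  have h2 := le_csum pl hne hpos (j + k) (pl.length - k)
  have h3 := csum_cycle pl j
  omega

lemma ex_stop (pl : List Int) (hne : pl ≠ []) (hpos : ∀ x ∈ pl, 1 ≤ x) (temp : Int) (j : Nat) :
    ∃ k : Nat, temp - csum pl j k ≤ 0 := by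
  refine ⟨temp.toNat, ?_⟩
  have := le_csum pl hne hpos j temp.toNat
  omega

lemma find_zero (pl : List Int) (hne : pl ≠ []) (hpos : ∀ x ∈ pl, 1 ≤ x) (temp : Int) (j : Nat)
    (h : temp ≤ 0) : Nat.find (ex_stop pl hne hpos temp j) = 0 := by
  rw [Nat.find_eq_zero]
  simp [csum_zero]
  omega

lemma find_shift (pl : List Int) (hne : pl ≠ []) (hpos : ∀ x ∈ pl, 1 ≤ x) (temp : Int) (j : Nat)
    (h : 0 < temp) :
    Nat.find (ex_stop pl hne hpos temp j) =
      Nat.find (ex_stop pl hne hpos (temp - cyc pl j) (j + 1)) + 1 := by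
  have hq := Nat.find_spec (ex_stop pl hne hpos (temp - cyc pl j) (j + 1))
  rw [Nat.find_eq_iff]
  constructor
  · rw [csum_succ_left]
    omega
  · intro k hk
    match k with
    | 0 => simp [csum_zero]; omega
    | k + 1 =>
        have hmin := Nat.find_min (ex_stop pl hne hpos (temp - cyc pl j) (j + 1))
          (m := k) (by omega)
        rw [csum_succ_left]
        omega

-- A's inner loop counts 1 + (least k with csum ≥ temp)
lemma aLoop_eq (pl : List Int) (hne : pl ≠ []) (hpos : ∀ x ∈ pl, 1 ≤ x) :
    ∀ (fuel : Nat) (temp : Int) (j : Nat) (count : Int), j ≤ pl.length → temp < (fuel : Int) →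
      aLoop pl fuel temp (j : Int) count =
        count + (Nat.find (ex_stop pl hne hpos temp j) : Int) := by
  intro fuel
  induction fuel with
  | zero =>
      intro temp j count hj hf
      rw [aLoop, find_zero pl hne hpos temp j (by exact_mod_cast by omega)]
      simp
  | succ fuel ih =>
      intro temp j count hj hf
      by_cases ht : temp ≤ 0
      · rw [aLoop, if_pos ht, find_zero pl hne hpos temp j ht]
        simp
      · push Not at ht
        have hn : 0 < pl.length := List.length_pos_iff.mpr hne
        have hj2 : (if (j : Int) ≥ (pl.length : Int) then 0 else (j : Int))
            = ((j % pl.length : Nat) : Int) := by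
          by_cases hcase : j < pl.length
          · rw [if_neg (by exact_mod_cast by omega), Nat.mod_eq_of_lt hcase]
          · have : j = pl.length := by omega
            subst this
            rw [if_pos (le_refl _), Nat.mod_self]
            simp
        have hget : PySem.List.pyGetD pl ((j % pl.length : Nat) : Int) 0 = cyc pl j := by
          rw [PySem.List.pyGetD_natCast, cyc]
        have hstep : aLoop pl (fuel + 1) temp (j : Int) count
            = aLoop pl fuel (temp - cyc pl j) (((j % pl.length : Nat) : Int) + 1) (count + 1) := by
          rw [aLoop, if_neg (by omega)]
          simp only [hj2, hget]
        have hcast : ((j % pl.length : Nat) : Int) + 1 = (((j % pl.length + 1 : Nat)) : Int) := by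
          push_cast; ring
        have hcyc1 : 1 ≤ cyc pl j := hpos _ (cyc_mem pl hne j)
        have hrec := ih (temp - cyc pl j) (j % pl.length + 1) (count + 1)
          (by have := Nat.mod_lt j hn; omega) (by push_cast at hf ⊢; omega)
        rw [hstep, hcast, hrec]
        have hsame : ∀ k, csum pl (j % pl.length + 1) k = csum pl (j + 1) k := fun k =>
          csum_mod_add pl j 1 k
        have hfindeq : Nat.find (ex_stop pl hne hpos (temp - cyc pl j) (j % pl.length + 1))
            = Nat.find (ex_stop pl hne hpos (temp - cyc pl j) (j + 1)) := by
          apply Nat.find_congr'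
          intro k
          rw [hsame k]
        rw [hfindeq, find_shift pl hne hpos temp j ht]
        push_cast
        ring

-- prefix-sum list built by B's foldl
def runSums (s : Int) : List Int → List Int
  | [] => []
  | x :: xs => (s + x) :: runSums (s + x) xs

lemma pref_build (l : List Int) : ∀ (acc : List Int) (s : Int),
    PySem.List.pyGetD acc (-1) 0 = s →
    l.foldl (fun acc x => acc ++ [PySem.List.pyGetD acc (-1) 0 + x]) acc = acc ++ runSums s l := by
  induction l with
  | nil => intro acc s _; simp [runSums]
  | cons x xs ih =>
      intro acc s hs
      rw [List.foldl_cons, hs,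
        ih (acc ++ [s + x]) (s + x) (PySem.List.pyGetD_neg_one_append_singleton ..),
        runSums, List.append_assoc]
      rfl

lemma runSums_getD (l : List Int) : ∀ (s : Int) (m : Nat), m < l.length →
    (runSums s l).getD m 0 = s + (l.take (m + 1)).sum := by
  induction l with
  | nil => intro s m h; simp at h
  | cons x xs ih =>
      intro s m h
      match m with
      | 0 => simp [runSums]
      | m + 1 =>
          rw [runSums, List.getD_cons_succ, ih (s + x) m (by simpa using h)]
          simp
          ring

lemma doubled_getElem (pl : List Int) (m : Nat) (h : m < 2 * pl.length) :
    (pl ++ pl).getD m 0 = cyc pl m := by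
  by_cases hm : m < pl.length
  · rw [List.getD_eq_getElem _ _ (by simp; omega), List.getElem_append_left hm, cyc,
      Nat.mod_eq_of_lt hm, List.getD_eq_getElem _ _ hm]
  · have hlt : m - pl.length < pl.length := by omega
    rw [List.getD_eq_getElem _ _ (by simp; omega), List.getElem_append_right (by omega), cyc]
    have : m % pl.length = m - pl.length := by
      rw [Nat.mod_eq_sub_mod (by omega), Nat.mod_eq_of_lt hlt]
    rw [this, List.getD_eq_getElem _ _ hlt]

lemma doubled_take_csum (pl : List Int) : ∀ (k m : Nat), m + k ≤ 2 * pl.length →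
    (((pl ++ pl).drop m).take k).sum = csum pl m k := by
  intro k
  induction k with
  | zero => intro m h; simp [csum_zero]
  | succ k ih =>
      intro m h
      have hm : m < (pl ++ pl).length := by simp; omega
      rw [List.drop_eq_getElem_cons hm, List.take_succ_cons, List.sum_cons,
        ih (m + 1) (by omega), csum_succ_left]
      congr 1
      rw [← doubled_getElem pl m (by omega), List.getD_eq_getElem _ _ hm]

-- bisect finds the least index satisfying the (monotone) predicate
lemma bisect_spec (pref : List Int) (target : Int) :
    ∀ (N : Nat) (lo hi : Int), (hi - lo).toNat ≤ N → 0 ≤ lo → lo ≤ hi →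
    (∀ a b : Int, lo ≤ a → a ≤ b → b ≤ hi → PySem.List.pyGetD pref a 0 ≥ target →
      PySem.List.pyGetD pref b 0 ≥ target) →
    PySem.List.pyGetD pref hi 0 ≥ target →
    lo ≤ bisect pref target lo hi ∧ bisect pref target lo hi ≤ hi ∧
      PySem.List.pyGetD pref (bisect pref target lo hi) 0 ≥ target ∧
      (∀ m : Int, lo ≤ m → m < bisect pref target lo hi → ¬ PySem.List.pyGetD pref m 0 ≥ target) := by
  intro N
  induction N with
  | zero =>
      intro lo hi hN h0 hlh _ hhi
      have heq : lo = hi := by omega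
      subst heq
      rw [bisect, if_pos (le_refl _)]
      exact ⟨le_refl _, le_refl _, hhi, fun m h1 h2 => by omega⟩
  | succ N ih =>
      intro lo hi hN h0 hlh hmono hhi
      by_cases hge : lo ≥ hi
      · have heq : lo = hi := by omega
        subst heq
        rw [bisect, if_pos (le_refl _)]
        exact ⟨le_refl _, le_refl _, hhi, fun m h1 h2 => by omega⟩
      · have hlt : lo < hi := by omega
        rw [bisect, if_neg hge]
        have hmid : PySem.Int.floordiv (lo + hi) 2 = (lo + hi) / 2 :=
          PySem.Int.floordiv_eq_ediv_of_pos (by omega)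
        set mid := PySem.Int.floordiv (lo + hi) 2 with hmiddef
        have hb1 : lo ≤ mid := by rw [hmid]; omega
        have hb2 : mid < hi := by rw [hmid]; omega
        by_cases hp : PySem.List.pyGetD pref mid 0 ≥ target
        · rw [if_pos hp]
          have hres := ih lo mid (by omega) h0 hb1
            (fun a b ha hab hb hPa => hmono a b ha hab (by omega) hPa) hp
          exact ⟨hres.1, by omega, hres.2.2.1, hres.2.2.2⟩
        · rw [if_neg hp]
          have hres := ih (mid + 1) hi (by omega) (by omega) (by omega)
            (fun a b ha hab hb hPa => hmono a b (by omega) hab hb hPa) hhi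
          refine ⟨by omega, hres.2.1, hres.2.2.1, ?_⟩
          intro m h1 h2
          by_cases hm : m ≤ mid
          · intro hPm
            exact hp (hmono m mid h1 hm (by omega) hPm)
          · exact hres.2.2.2 m (by omega) h2

-- A as a closed formula: each start i hears 1 + (least k with csum ≥ listen_time - 1) songs
lemma solution_char (pl : List Int) (hne : pl ≠ []) (hpos : ∀ x ∈ pl, 1 ≤ x) (lt : Int) :
    solution pl lt =
      (let tpl := (List.range pl.length).map
        (fun i => 1 + (Nat.find (ex_stop pl hne hpos (lt - 1) (i + 1)) : Int));
       let answer := (PySem.List.max? tpl (fun y => y)).getD 0;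
       if answer ≥ (pl.length : Int) then (pl.length : Int) else answer) := by
  unfold solution
  rw [PySem.List.foldl_congr_mem _ _
      (fun acc i => acc ++ [1 + (Nat.find (ex_stop pl hne hpos (lt - 1) (i + 1)) : Int)]) _
      (by
        intro acc i hi
        have hi' : i < pl.length := List.mem_range.mp hi
        have hcast : ((i : Int) + 1) = ((i + 1 : Nat) : Int) := by push_cast; ring
        rw [hcast, aLoop_eq pl hne hpos (lt.toNat + 1) (lt - 1) (i + 1) 1 (by omega) (by omega)]),
    PySem.List.foldl_append_singleton_eq_map, List.nil_append]

-- the prefix list B builds, evaluated: entry m is the cyclic sum of the first m songs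
lemma pref_getD (pl : List Int) (m : Nat) (hm : m ≤ 2 * pl.length) :
    ((pl ++ pl).foldl (fun acc x => acc ++ [PySem.List.pyGetD acc (-1) 0 + x]) [0]).getD m 0
      = csum pl 0 m := by
  rw [pref_build (pl ++ pl) [0] 0 (by decide), List.singleton_append]
  match m with
  | 0 => simp [csum_zero]
  | m + 1 =>
      rw [List.getD_cons_succ, runSums_getD (pl ++ pl) 0 m (by simp; omega), zero_add]
      have h := doubled_take_csum pl (m + 1) 0 (by omega)
      simpa using h

-- csum from 0 is monotone when all songs are ≥ 1
lemma csum_zero_mono (pl : List Int) (hne : pl ≠ []) (hpos : ∀ x ∈ pl, 1 ≤ x) (a b : Nat)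
    (hab : a ≤ b) : csum pl 0 a ≤ csum pl 0 b := by
  have h1 := csum_add pl 0 a (b - a)
  rw [Nat.zero_add, show a + (b - a) = b from by omega] at h1
  have h2 := le_csum pl hne hpos a (b - a)
  omega

-- B's binary search lands exactly on A's count for start i
lemma bisect_exact (pl : List Int) (hne : pl ≠ []) (hpos : ∀ x ∈ pl, 1 ≤ x) (L : Int)
    (hLtot : L ≤ pl.sum) (i : Nat) (hi : i < pl.length) :
    bisect ((pl ++ pl).foldl (fun acc x => acc ++ [PySem.List.pyGetD acc (-1) 0 + x]) [0])
        (PySem.List.pyGetD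
          ((pl ++ pl).foldl (fun acc x => acc ++ [PySem.List.pyGetD acc (-1) 0 + x]) [0])
          ((i : Int) + 1) 0 + L)
        ((i : Int) + 1) ((i : Int) + 1 + (pl.length : Int))
      = ((i : Int) + 1) + (Nat.find (ex_stop pl hne hpos L (i + 1)) : Int) := by
  set pref := (pl ++ pl).foldl (fun acc x => acc ++ [PySem.List.pyGetD acc (-1) 0 + x]) [0]
    with hprefdef
  have hget : ∀ a : Int, 0 ≤ a → a ≤ 2 * pl.length →
      PySem.List.pyGetD pref a 0 = csum pl 0 a.toNat := by
    intro a h1 h2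
    obtain ⟨u, rfl⟩ : ∃ u : Nat, a = ((u : Nat) : Int) := ⟨a.toNat, by omega⟩
    rw [PySem.List.pyGetD_natCast, hprefdef, pref_getD pl u (by omega)]
    simp
  have htarget : PySem.List.pyGetD pref ((i : Int) + 1) 0 = csum pl 0 (i + 1) := by
    rw [hget ((i : Int) + 1) (by omega) (by omega)]
    congr 1
  rw [htarget]
  set target := csum pl 0 (i + 1) + L with htargetdef
  have hmono : ∀ a b : Int, (i : Int) + 1 ≤ a → a ≤ b → b ≤ (i : Int) + 1 + (pl.length : Int) →
      PySem.List.pyGetD pref a 0 ≥ target → PySem.List.pyGetD pref b 0 ≥ target := by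
    intro a b h1 h2 h3 hPa
    rw [hget a (by omega) (by omega)] at hPa
    rw [hget b (by omega) (by omega)]
    have := csum_zero_mono pl hne hpos a.toNat b.toNat (by omega)
    omega
  have hhi : PySem.List.pyGetD pref ((i : Int) + 1 + (pl.length : Int)) 0 ≥ target := by
    rw [hget _ (by omega) (by omega)]
    have hcast : ((i : Int) + 1 + (pl.length : Int)).toNat = (i + 1) + pl.length := by omega
    rw [hcast, csum_add, Nat.zero_add, csum_cycle]
    omega
  have hres := bisect_spec pref target (((i : Int) + 1 + (pl.length : Int)) - ((i : Int) + 1)).toNat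
    ((i : Int) + 1) ((i : Int) + 1 + (pl.length : Int)) (le_refl _) (by omega) (by omega) hmono hhi
  set k := Nat.find (ex_stop pl hne hpos L (i + 1)) with hkdef
  have hkle : k ≤ pl.length := by
    apply Nat.find_le
    rw [csum_cycle]
    omega
  have hPk : PySem.List.pyGetD pref ((((i + 1) + k : Nat)) : Int) 0 ≥ target := by
    rw [hget _ (by omega) (by omega)]
    have hcast : (((i + 1 + k : Nat) : Int)).toNat = (i + 1) + k := by omega
    rw [hcast, csum_add, Nat.zero_add]
    have hspec := Nat.find_spec (ex_stop pl hne hpos L (i + 1))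
    rw [← hkdef] at hspec
    omega
  set r := bisect pref target ((i : Int) + 1) ((i : Int) + 1 + (pl.length : Int)) with hrdef
  by_cases hcmp : r < (((i + 1) + k : Nat) : Int)
  · exfalso
    have hr0 : 0 ≤ r := by omega
    have hrk : r.toNat = (i + 1) + (r.toNat - (i + 1)) := by omega
    have hlt' : r.toNat - (i + 1) < k := by omega
    have hmin := Nat.find_min (ex_stop pl hne hpos L (i + 1)) (m := r.toNat - (i + 1))
      (by rw [← hkdef]; omega)
    have hPr := hres.2.2.1
    rw [hget r (by omega) (by omega), hrk, csum_add, Nat.zero_add] at hPr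
    omega
  · by_cases hcmp2 : (((i + 1) + k : Nat) : Int) < r
    · exfalso
      exact (hres.2.2.2 _ (by push_cast; omega) hcmp2) hPk
    · push_cast at hcmp hcmp2 ⊢
      omega

-- A with listen_time ≤ 1: every start hears exactly one song
lemma solution_short (pl : List Int) (hne : pl ≠ []) (lt : Int) (hlt : lt ≤ 1) :
    solution pl lt = 1 := by
  obtain ⟨m, hm⟩ : ∃ m, pl.length = m + 1 :=
    ⟨pl.length - 1, by have := List.length_pos_iff.mpr hne; omega⟩
  unfold solution
  dsimp only
  rw [PySem.List.foldl_congr_mem _ _ (fun acc (_ : Nat) => acc ++ [(1 : Int)]) _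
      (by
        intro acc i _
        rw [aLoop, if_pos (by omega)]),
    PySem.List.foldl_append_singleton_eq_map, List.nil_append, hm, List.range_succ_eq_map,
    List.map_cons, PySem.List.max?_id_cons]
  have hconst : ∀ (l : List Nat) (a : Int), 1 ≤ a →
      (l.map (fun _ => (1 : Int))).foldl max a = a := by
    intro l
    induction l with
    | nil => intro a ha; rfl
    | cons x xs ih =>
        intro a ha
        rw [List.map_cons, List.foldl_cons, max_eq_left ha]
        exact ih a ha
  simp only [List.map_map, Function.comp_def]
  rw [hconst _ 1 (le_refl _)]
  have : ¬ ((1 : Int) ≥ ((m + 1 + 1 : Nat) : Int)) ∨ m = 0 := by omega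
  rcases Nat.eq_zero_or_pos m with h0 | h0
  · subst h0; norm_num
  · rw [Option.getD_some, if_neg (by push_cast; omega)]

-- ===== VERDICT (by name: the statement is the Claim_ definition above) =====
theorem solution_spec : Claim_equal_solution := by
  intro pl lt hdom hpre
  obtain ⟨hne, hd⟩ := hpre
  simp only [Spec_solution]
  have hn : 0 < pl.length := List.length_pos_iff.mpr hne
  by_cases hlt : lt ≤ 1
  · rw [solution_short pl hne lt hlt]
    simp only [solution_alt, if_pos hlt]
    omega
  · have hpos : ∀ x ∈ pl, 1 ≤ x := by
      rcases hd with h | h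
      · omega
      · exact h
    obtain ⟨m, hm⟩ : ∃ m, pl.length = m + 1 := ⟨pl.length - 1, by omega⟩
    rw [solution_char pl hne hpos lt]
    dsimp only
    simp only [solution_alt, if_neg hlt]
    by_cases htot : lt - 1 > pl.sum
    · rw [if_pos htot]
      -- every count exceeds the playlist length, so A caps at length
      have hc0 : (pl.length : Int) + 2 ≤ 1 + (Nat.find (ex_stop pl hne hpos (lt - 1) (0 + 1)) : Int) := by
        have hfind : pl.length < Nat.find (ex_stop pl hne hpos (lt - 1) (0 + 1)) := by
          rw [Nat.lt_find_iff]
          intro k hk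
          have := csum_le_total pl hne hpos (0 + 1) k hk
          omega
        omega
      rw [hm] at hc0
      rw [hm, List.range_succ_eq_map, List.map_cons, PySem.List.max?_id_cons, Option.getD_some]
      have hle := (PySem.List.le_foldl_max
        (((List.range m).map Nat.succ).map (fun i => 1 + (Nat.find (ex_stop pl hne hpos (lt - 1) (i + 1)) : Int)))
        (1 + (Nat.find (ex_stop pl hne hpos (lt - 1) (0 + 1)) : Int))).1
      rw [if_pos (by push_cast at hc0 ⊢; omega)]
    · rw [if_neg htot]
      have hLtot : lt - 1 ≤ pl.sum := by omega
      rw [PySem.List.foldl_congr_mem _ _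
          (fun best (i : Nat) =>
            max best (1 + (Nat.find (ex_stop pl hne hpos (lt - 1) (i + 1)) : Int))) _
          (by
            intro best i hi
            have hi' : i < pl.length := List.mem_range.mp hi
            rw [bisect_exact pl hne hpos (lt - 1) hLtot i hi']
            congr 1
            ring),
        ← List.foldl_map]
      rw [hm, List.range_succ_eq_map, List.map_cons, PySem.List.max?_id_cons, Option.getD_some,
        List.foldl_cons]
      have hge1 : (1 : Int) ≤ 1 + (Nat.find (ex_stop pl hne hpos (lt - 1) (0 + 1)) : Int) := by omega
      rw [max_eq_right (by omega)]
      set ans := ((List.range m).map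
        ((fun i => 1 + (Nat.find (ex_stop pl hne hpos (lt - 1) (i + 1)) : Int)) ∘ Nat.succ)).foldl
          max (1 + (Nat.find (ex_stop pl hne hpos (lt - 1) (0 + 1)) : Int))
      split_ifs with h
      · omega
      · omega
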